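-- pv_equiv track=rewrite | github.com/rasbt/pybibtex | pybibtex/pybibtex.py | ids_to_string
-- ===== SOURCE A (Python) =====
-- from operator import itemgetter
-- from itertools import groupby
--
-- def ids_to_string(ids_list):
--     """Converts lists of integer IDs to text"""
--     sorted_ids = sorted(ids_list)
--     ranges = []
--     for key, group in groupby(enumerate(sorted_ids), lambda x: x[0] - x[1]):
--         group = list(map(itemgetter(1), group))
--         if len(group) > 1:
--             ranges.append([group[0], group[-1]])
--         else:
--             ranges.append(group[0])
--
--     parsed = []
--     for r in ranges:
--         if isinstance(r, list):
--             parsed.append('%d-%d' % (r[0], r[1]))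
--         else:
--             parsed.append(str(r))
--
--     return '[%s]' % ','.join(parsed)
-- ===== SOURCE B (Python) =====
-- def ids_to_string(ids_list):
--     """Converts lists of integer IDs to text"""
--     s = sorted(ids_list)
--     if not s:
--         return '[]'
--     parts = []
--     run_start = prev = s[0]
--     for v in s[1:]:
--         if v == prev + 1:
--             prev = v
--         else:
--             parts.append('%d-%d' % (run_start, prev) if run_start != prev else str(run_start))
--             run_start = prev = v
--     parts.append('%d-%d' % (run_start, prev) if run_start != prev else str(run_start))
--     return '[%s]' % ','.join(parts)
-- ===== Notes on version B (the rewrite author's own statement) =====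
-- stated objective: simpler
-- what changed: Replaces the enumerate/groupby index-difference trick plus a second type-dispatching pass over mixed int/list entries with one explicit run_start/prev sweep over the sorted list that emits each range string directly.
import Mathlib
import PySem

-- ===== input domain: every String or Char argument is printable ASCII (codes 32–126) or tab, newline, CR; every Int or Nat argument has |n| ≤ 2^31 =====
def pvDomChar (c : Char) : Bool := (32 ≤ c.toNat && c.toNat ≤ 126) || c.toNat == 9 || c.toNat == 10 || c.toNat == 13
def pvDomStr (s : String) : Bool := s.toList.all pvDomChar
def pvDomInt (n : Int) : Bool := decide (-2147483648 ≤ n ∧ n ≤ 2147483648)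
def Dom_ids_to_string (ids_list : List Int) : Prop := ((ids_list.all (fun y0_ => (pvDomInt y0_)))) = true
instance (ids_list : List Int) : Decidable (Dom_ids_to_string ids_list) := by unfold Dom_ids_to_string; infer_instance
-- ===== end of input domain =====

-- B replaces A's enumerate/groupby index-difference trick and second type-dispatching
-- pass with one explicit run_start/prev sweep over the sorted list (objective: simpler).

-- ===== PORT A =====
-- itertools.groupby over the enumerate pairs, keyed by index - value (hand port, exact:
-- consecutive elements stay in one group iff their keys are equal)
def groupByKey : List (Int × Int) → List (List (Int × Int))
  | [] => []
  | x :: xs =>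
    (x :: xs.takeWhile (fun y => y.1 - y.2 == x.1 - x.2)) ::
      groupByKey (xs.dropWhile (fun y => y.1 - y.2 == x.1 - x.2))
termination_by l => l.length
decreasing_by
  have := List.length_dropWhile_le (fun y : Int × Int => y.1 - y.2 == x.1 - x.2) xs
  simp; omega

def ids_to_string (ids_list : List Int) : String :=
  let sorted_ids := PySem.List.sorted ids_list (fun x => x) false
  let ranges : List (Sum Int (Int × Int)) :=
    (groupByKey (PySem.List.enumerate sorted_ids)).map (fun g =>
      let group := g.map (·.2)
      if group.length > 1 then Sum.inr (group.headD 0, group.getLastD 0)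
      else Sum.inl (group.headD 0))
  let parsed : List String := ranges.map (fun r =>
    match r with
    | Sum.inr (a, b) => PySem.Int.toStr a ++ "-" ++ PySem.Int.toStr b
    | Sum.inl a => PySem.Int.toStr a)
  "[" ++ PySem.Str.join "," parsed ++ "]"

-- ===== PORT B =====
def flushRun (run_start prev : Int) : String :=
  if run_start != prev then PySem.Int.toStr run_start ++ "-" ++ PySem.Int.toStr prev
  else PySem.Int.toStr run_start

def altLoop (run_start prev : Int) (parts : List String) : List Int → List String
  | [] => parts ++ [flushRun run_start prev]
  | v :: vs =>
    if v = prev + 1 then altLoop run_start v parts vs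
    else altLoop v v (parts ++ [flushRun run_start prev]) vs

def ids_to_string_alt (ids_list : List Int) : String :=
  match PySem.List.sorted ids_list (fun x => x) false with
  | [] => "[]"
  | p :: rest => "[" ++ PySem.Str.join "," (altLoop p p [] rest) ++ "]"

-- ===== PRECONDITION & SPEC =====
def Spec_ids_to_string (ids_list : List Int) (out : String) : Prop := out = ids_to_string_alt ids_list
instance (ids_list : List Int) (out : String) : Decidable (Spec_ids_to_string ids_list out) := by unfold Spec_ids_to_string; infer_instance

-- ===== CLAIM (what is proved, stated in full; the proofs are below) =====
def Claim_equal_ids_to_string : Prop := ∀ (ids_list : List Int), Dom_ids_to_string ids_list → Spec_ids_to_string ids_list (ids_to_string ids_list)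

-- ===== LEMMAS AND PROOFS =====

-- the maximal consecutive run following p, and the rest
def runTake (p : Int) : List Int → List Int
  | [] => []
  | v :: vs => if v = p + 1 then v :: runTake v vs else []

def runDrop (p : Int) : List Int → List Int
  | [] => []
  | v :: vs => if v = p + 1 then runDrop v vs else v :: vs

def runsAux (rs p : Int) : List Int → List (Int × Int)
  | [] => [(rs, p)]
  | v :: vs => if v = p + 1 then runsAux rs v vs else (rs, p) :: runsAux v v vs

def renderA (g : List (Int × Int)) : String :=
  let group := g.map (·.2)
  match (if group.length > 1 then Sum.inr (group.headD 0, group.getLastD 0)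
         else Sum.inl (group.headD 0) : Sum Int (Int × Int)) with
  | Sum.inr (a, b) => PySem.Int.toStr a ++ "-" ++ PySem.Int.toStr b
  | Sum.inl a => PySem.Int.toStr a

theorem runDrop_length_le : ∀ (vs : List Int) (p : Int), (runDrop p vs).length ≤ vs.length := by
  intro vs
  induction vs with
  | nil => intro p; simp [runDrop]
  | cons v vs ih =>
    intro p
    simp only [runDrop]
    split
    · exact le_trans (ih v) (Nat.le_succ _)
    · simp

theorem runTake_last_gt : ∀ (vs : List Int) (p : Int), runTake p vs ≠ [] → p < (runTake p vs).getLastD p := by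
  intro vs
  induction vs with
  | nil => intro p h; simp [runTake] at h
  | cons v vs ih =>
    intro p h
    simp only [runTake] at h ⊢
    split
    · rename_i hv
      rw [List.getLastD_cons]
      by_cases hr : runTake v vs = []
      · simp [hr]; omega
      · have := ih v hr
        omega
    · simp at h; omega

theorem enum_takeWhile_dropWhile : ∀ (vs : List Int) (n p : Int),
    (PySem.List.enumerate vs (n+1)).takeWhile (fun y => y.1 - y.2 == n - p)
      = PySem.List.enumerate (runTake p vs) (n+1) ∧
    (PySem.List.enumerate vs (n+1)).dropWhile (fun y => y.1 - y.2 == n - p)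
      = PySem.List.enumerate (runDrop p vs) (n + 1 + (runTake p vs).length) := by
  intro vs
  induction vs with
  | nil => intro n p; simp [PySem.List.enumerate_nil, runTake, runDrop]
  | cons v vs ih =>
    intro n p
    rw [PySem.List.enumerate_cons]
    by_cases hv : v = p + 1
    · subst hv
      have hkeq : (fun y : Int × Int => y.1 - y.2 == n - p)
          = (fun y : Int × Int => y.1 - y.2 == (n+1) - (p+1)) := by
        funext y; congr 1; omega
      obtain ⟨iht, ihd⟩ := ih (n+1) (p+1)
      have hc : ((n + 1 : Int) - (p + 1) == n - p) = true := by simp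
      have hrt : runTake p ((p+1) :: vs) = (p+1) :: runTake (p+1) vs := by
        simp [runTake]
      have hrd : runDrop p ((p+1) :: vs) = runDrop (p+1) vs := by
        simp [runDrop]
      constructor
      · rw [List.takeWhile_cons]
        simp only [hc, if_true]
        rw [hrt, PySem.List.enumerate_cons]
        congr 1
        rw [hkeq]; exact iht
      · rw [List.dropWhile_cons]
        simp only [hc, if_true]
        rw [hkeq, ihd, hrd, hrt]
        congr 1
        simp only [List.length_cons]
        push_cast
        omega
    · have hc : ((n + 1 : Int) - v == n - p) = false := by simp; omega
      have hrt : runTake p (v :: vs) = [] := by simp [runTake, hv]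
      have hrd : runDrop p (v :: vs) = v :: vs := by simp [runDrop, hv]
      constructor
      · rw [List.takeWhile_cons]
        simp only [hc, Bool.false_eq_true, if_false]
        simp [hrt, PySem.List.enumerate_nil]
      · rw [List.dropWhile_cons]
        simp only [hc, Bool.false_eq_true, if_false]
        rw [hrd, hrt, PySem.List.enumerate_cons]
        simp

theorem runsAux_peel : ∀ (vs : List Int) (rs p : Int),
    runsAux rs p vs = (rs, (runTake p vs).getLastD p) ::
      (match runDrop p vs with
       | [] => []
       | v :: vs' => runsAux v v vs') := by
  intro vs
  induction vs with
  | nil => intro rs p; simp [runsAux, runTake, runDrop]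
  | cons v vs ih =>
    intro rs p
    simp only [runsAux, runTake, runDrop]
    split
    · rw [ih rs v, List.getLastD_cons]
    · rfl

theorem groupByKey_main : ∀ (k : Nat) (vs : List Int), vs.length ≤ k → ∀ (n p : Int),
    (groupByKey (PySem.List.enumerate (p :: vs) n)).map renderA
      = (runsAux p p vs).map (fun q => flushRun q.1 q.2) := by
  intro k
  induction k with
  | zero =>
    intro vs hlen n p
    have : vs = [] := List.length_eq_zero_iff.mp (Nat.le_zero.mp hlen)
    subst this
    simp [PySem.List.enumerate_cons, PySem.List.enumerate_nil, groupByKey, runsAux,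
      renderA, flushRun]
  | succ k ih =>
    intro vs hlen n p
    rw [PySem.List.enumerate_cons, groupByKey]
    obtain ⟨htw, hdw⟩ := enum_takeWhile_dropWhile vs n p
    rw [htw, hdw]
    rw [runsAux_peel]
    rw [List.map_cons, List.map_cons]
    congr 1
    · -- first group renders to flushRun p last
      show renderA ((n, p) :: PySem.List.enumerate (runTake p vs) (n+1)) = _
      by_cases hr : runTake p vs = []
      · simp [hr, renderA, PySem.List.enumerate_nil, flushRun]
      · have hlast := runTake_last_gt vs p hr
        have hne : p ≠ (runTake p vs).getLastD p := by omega
        have hlen' : 0 < (runTake p vs).length := List.length_pos_iff.mpr hr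
        simp only [renderA, flushRun, List.map_cons, PySem.List.map_snd_enumerate]
        have h1 : (p :: runTake p vs).length > 1 := by simp; omega
        rw [if_pos h1]
        have hd : (p :: runTake p vs).headD 0 = p := rfl
        have hl : (p :: runTake p vs).getLastD 0 = (runTake p vs).getLastD p := by
          rw [List.getLastD_cons]
        rw [hd, hl]
        simp only [bne_iff_ne, ne_eq, hne, not_false_eq_true, if_pos]
    · -- tail groups
      cases hdrop : runDrop p vs with
      | nil => simp [PySem.List.enumerate_nil, groupByKey]
      | cons v vs' =>
        have hle : (runDrop p vs).length ≤ vs.length := runDrop_length_le vs p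
        rw [hdrop] at hle
        have : vs'.length ≤ k := by simp at hle; omega
        exact ih vs' this _ v

theorem altLoop_eq : ∀ (vs : List Int) (rs p : Int) (parts : List String),
    altLoop rs p parts vs = parts ++ (runsAux rs p vs).map (fun q => flushRun q.1 q.2) := by
  intro vs
  induction vs with
  | nil => intro rs p parts; simp [altLoop, runsAux]
  | cons v vs ih =>
    intro rs p parts
    simp only [altLoop, runsAux]
    split
    · exact ih rs v parts
    · rw [ih v v (parts ++ [flushRun rs p])]
      simp

-- ===== VERDICT (by name: the statement is the Claim_ definition above) =====
theorem ids_to_string_spec : Claim_equal_ids_to_string := by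
  unfold Claim_equal_ids_to_string
  intro ids_list _
  unfold Spec_ids_to_string ids_to_string ids_to_string_alt
  cases hs : PySem.List.sorted ids_list (fun x => x) false with
  | nil =>
    simp only [PySem.List.enumerate_nil, groupByKey, List.map_nil]
    decide
  | cons p vs =>
    simp only []
    rw [altLoop_eq vs p p []]
    rw [List.nil_append]
    rw [List.map_map]
    have := groupByKey_main vs.length vs (le_refl _) 0 p
    rw [show ((groupByKey (PySem.List.enumerate (p :: vs) 0)).map
        (((fun r : Sum Int (Int × Int) =>
            match r with
            | Sum.inr (a, b) => PySem.Int.toStr a ++ "-" ++ PySem.Int.toStr b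
            | Sum.inl a => PySem.Int.toStr a) ∘
          (fun g : List (Int × Int) =>
            let group := g.map (·.2)
            if group.length > 1 then Sum.inr (group.headD 0, group.getLastD 0)
            else Sum.inl (group.headD 0)))))
      = (groupByKey (PySem.List.enumerate (p :: vs) 0)).map renderA from by
        apply List.map_congr_left; intro g _; rfl]
    rw [this]
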